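-- pv_equiv track=rewrite | github.com/pypi-data/pypi-mirror-288 | packages/catbench/catbench-0.1.1.tar.gz/catbench-0.1.1/catbench/core.py | find_median_index
-- ===== SOURCE A (Python) =====
-- from copy import deepcopy
--
-- def find_median_index(arr):
--     orig_arr = deepcopy(arr)
--     sorted_arr = sorted(arr)
--     length = len(sorted_arr)
--     median_index = (length - 1) // 2
--     median_value = sorted_arr[median_index]
--     for i, num in enumerate(orig_arr):
--         if num == median_value:
--             return i, median_value
-- ===== SOURCE B (Python) =====
-- def find_median_index(arr):
--     # quickselect for rank (len(arr)-1)//2, then arr.index for the first position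
--     def select(xs, k):
--         while True:
--             p = xs[0]
--             lt = [x for x in xs if x < p]
--             if k < len(lt):
--                 xs = lt
--                 continue
--             c = len(lt) + xs.count(p)
--             if k < c:
--                 return p
--             xs = [x for x in xs if x > p]
--             k -= c
--     v = select(arr, (len(arr) - 1) // 2)
--     return arr.index(v), v
-- ===== Notes on version B (the rewrite author's own statement) =====
-- stated objective: faster
-- what changed: replaced sort-then-index by a quickselect of rank (n-1)//2 followed by arr.index, removing the full sort
import Mathlib
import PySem

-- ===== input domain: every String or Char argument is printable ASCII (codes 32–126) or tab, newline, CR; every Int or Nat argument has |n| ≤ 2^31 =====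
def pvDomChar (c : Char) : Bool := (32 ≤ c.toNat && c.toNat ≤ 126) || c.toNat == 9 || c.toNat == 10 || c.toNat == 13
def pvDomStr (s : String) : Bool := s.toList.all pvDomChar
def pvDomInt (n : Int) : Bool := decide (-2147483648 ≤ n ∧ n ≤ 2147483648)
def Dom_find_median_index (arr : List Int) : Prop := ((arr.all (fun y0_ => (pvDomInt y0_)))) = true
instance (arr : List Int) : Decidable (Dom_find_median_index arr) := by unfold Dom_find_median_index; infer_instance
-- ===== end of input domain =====

-- B replaces A's full sort by a quickselect of rank (n-1)//2 plus arr.index (objective: faster).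

-- ===== PORT A =====
-- the 'for i, num in enumerate(orig_arr): if num == median_value: return i, median_value' loop;
-- none = the loop falls through (Python would return None); under Pre_ it always returns some
def findLoopA : List (Int × Int) → Int → Option (Int × Int)
  | [], _ => none
  | (i, num) :: rest, v => if num = v then some (i, v) else findLoopA rest v

def find_median_index (arr : List Int) : Int × Int :=
  let orig_arr := arr
  let sorted_arr := PySem.List.sorted arr (fun x => x) false
  let length : Int := sorted_arr.length
  let median_index := PySem.Int.floordiv (length - 1) 2
  match PySem.List.pyGet? sorted_arr median_index with
  | none => (0, 0)  -- IndexError on the empty list; excluded by Pre_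
  | some median_value => (findLoopA (PySem.List.enumerate orig_arr 0) median_value).getD (0, 0)

-- ===== PORT B =====
-- quickselect: the rank-k (0-based) value of xs; the [] case is unreachable for 0 ≤ k < len xs
-- (Python's xs[0] would raise IndexError there)
def selectB : List Int → Int → Int
  | [], _ => 0
  | p :: t, k =>
    let xs := p :: t
    let lt := xs.filter (fun x => decide (x < p))
    if k < (lt.length : Int) then selectB lt k
    else
      let c : Int := (lt.length : Int) + (xs.count p : Int)
      if k < c then p
      else selectB (xs.filter (fun x => decide (p < x))) (k - c)
termination_by xs _ => xs.length
decreasing_by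
  · simp only [List.length_filter_lt_length_iff_exists]
    exact ⟨p, List.mem_cons_self, by simp⟩
  · simp only [List.length_filter_lt_length_iff_exists]
    exact ⟨p, List.mem_cons_self, by simp⟩

def find_median_index_alt (arr : List Int) : Int × Int :=
  let v := selectB arr (PySem.Int.floordiv ((arr.length : Int) - 1) 2)
  (((PySem.List.index? arr v).getD 0 : Nat), v)

-- ===== PRECONDITION & SPEC =====
-- Pre_ excludes only the empty list, on which A raises IndexError (sorted_arr[-1] on [])
def Pre_find_median_index (arr : List Int) : Prop := arr ≠ []
instance (arr : List Int) : Decidable (Pre_find_median_index arr) := by unfold Pre_find_median_index; infer_instance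
def pvWitness_find_median_index : List Int := [3, 1, 2]

def Spec_find_median_index (arr : List Int) (out : Int × Int) : Prop := out = find_median_index_alt arr
instance (arr : List Int) (out : Int × Int) : Decidable (Spec_find_median_index arr out) := by unfold Spec_find_median_index; infer_instance

-- ===== CLAIM (what is proved, stated in full; the proofs are below) =====
def Claim_equal_find_median_index : Prop := ∀ (arr : List Int), Dom_find_median_index arr → Pre_find_median_index arr → Spec_find_median_index arr (find_median_index arr)

-- ===== LEMMAS AND PROOFS =====

theorem count_filter_prop (xs : List Int) (q : Int → Prop) [DecidablePred q] (a : Int) :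
    (xs.filter (fun x => decide (q x))).count a = if q a then xs.count a else 0 := by
  split_ifs with h
  · exact List.count_filter (by simp [h])
  · exact List.count_eq_zero.mpr (by simp [h])

-- sorted(xs) is: sorted of the elements below p, then count-of-p copies of p, then sorted of those above p
theorem sorted_decomp (xs : List Int) (p : Int) :
  PySem.List.sorted xs (fun x => x) false =
    PySem.List.sorted (xs.filter (fun x => decide (x < p))) (fun x => x) false
    ++ List.replicate (xs.count p) p
    ++ PySem.List.sorted (xs.filter (fun x => decide (p < x))) (fun x => x) false := by
  apply PySem.List.sorted_id_eq_of_perm_of_pairwise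
  · rw [List.perm_iff_count]
    intro a
    have h1 := (PySem.List.sorted_perm (xs.filter (fun x => decide (x < p))) (fun x => x) false).count_eq a
    have h2 := (PySem.List.sorted_perm (xs.filter (fun x => decide (p < x))) (fun x => x) false).count_eq a
    have h3 := count_filter_prop xs (fun x => x < p) a
    have h4 := count_filter_prop xs (fun x => p < x) a
    simp only [List.count_append, h1, h2, h3, h4, List.count_replicate]
    rcases lt_trichotomy a p with h | h | h
    · simp [h, not_lt.mpr (le_of_lt h)]
      exact fun he => absurd he (ne_of_gt h)
    · subst h; simp
    · simp [h, not_lt.mpr (le_of_lt h)]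
      exact fun he => absurd he (ne_of_lt h)
  · have hlt : ∀ a ∈ PySem.List.sorted (xs.filter (fun x => decide (x < p))) (fun x => x) false, a < p := by
      intro a ha
      rw [PySem.List.mem_sorted] at ha
      simpa using List.of_mem_filter ha
    have hgt : ∀ a ∈ PySem.List.sorted (xs.filter (fun x => decide (p < x))) (fun x => x) false, p < a := by
      intro a ha
      rw [PySem.List.mem_sorted] at ha
      simpa using List.of_mem_filter ha
    rw [List.pairwise_append]
    refine ⟨?_, ?_, ?_⟩
    · rw [List.pairwise_append]
      refine ⟨PySem.List.sorted_pairwise _ _, ?_, ?_⟩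
      · exact List.pairwise_replicate.mpr (Or.inr le_rfl)
      · intro a ha b hb
        have := List.eq_of_mem_replicate hb
        subst this
        exact le_of_lt (hlt a ha)
    · exact PySem.List.sorted_pairwise _ _
    · intro a ha b hb
      rcases List.mem_append.mp ha with h | h
      · exact le_of_lt (lt_trans (hlt a h) (hgt b hb))
      · have := List.eq_of_mem_replicate h; subst this
        exact le_of_lt (hgt b hb)

-- quickselect computes the rank-k element of the sorted list
theorem selectB_correct : ∀ (n : Nat) (xs : List Int), xs.length ≤ n → ∀ (k : Int), 0 ≤ k → k < (xs.length : Int) →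
    selectB xs k = (PySem.List.sorted xs (fun x => x) false).getD k.toNat 0 := by
  intro n
  induction n with
  | zero =>
    intro xs hlen k hk0 hk
    have : xs = [] := List.eq_nil_of_length_eq_zero (by omega)
    subst this; simp at hk; omega
  | succ n ih =>
    intro xs hlen k hk0 hk
    match xs with
    | [] => simp at hk; omega
    | p :: t =>
      set lt := (p :: t).filter (fun x => decide (x < p)) with hltdef
      set gt := (p :: t).filter (fun x => decide (p < x)) with hgtdef
      have hdec := sorted_decomp (p :: t) p
      rw [← hltdef, ← hgtdef] at hdec
      have hL : (PySem.List.sorted lt (fun x => x) false).length = lt.length := PySem.List.length_sorted _ _ _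
      have hG : (PySem.List.sorted gt (fun x => x) false).length = gt.length := PySem.List.length_sorted _ _ _
      have hlen3 : (p :: t).length = lt.length + (p :: t).count p + gt.length := by
        have := PySem.List.length_sorted (p :: t) (fun x => x) false
        rw [hdec] at this
        simp only [List.length_append, hL, hG, List.length_replicate] at this
        omega
      have hltlen : lt.length < (p :: t).length := by
        rw [List.length_filter_lt_length_iff_exists]
        exact ⟨p, List.mem_cons_self, by simp⟩
      have hgtlen : gt.length < (p :: t).length := by
        rw [List.length_filter_lt_length_iff_exists]
        exact ⟨p, List.mem_cons_self, by simp⟩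
      rw [selectB, hdec]
      simp only [← hltdef, ← hgtdef]
      by_cases h1 : k < (lt.length : Int)
      · rw [if_pos h1, ih lt (by omega) k hk0 (by omega)]
        rw [List.getD_append _ _ _ _ (by simp only [List.length_append, hL, List.length_replicate]; omega),
            List.getD_append _ _ _ _ (by rw [hL]; omega)]
      · rw [if_neg h1]
        by_cases h2 : k < (lt.length : Int) + ((p :: t).count p : Int)
        · rw [if_pos h2]
          rw [List.getD_append _ _ _ _ (by simp only [List.length_append, hL, List.length_replicate]; omega),
              List.getD_append_right _ _ _ _ (by rw [hL]; omega)]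
          rw [hL]
          rw [List.getD_eq_getElem?_getD, List.getElem?_replicate]
          rw [if_pos (by omega)]
          rfl
        · rw [if_neg h2]
          rw [ih gt (by omega) (k - ((lt.length : Int) + ((p :: t).count p : Int))) (by omega) (by omega)]
          rw [List.getD_append_right _ _ _ _ (by simp only [List.length_append, hL, List.length_replicate]; omega)]
          congr 1
          simp only [List.length_append, hL, List.length_replicate]
          omega

-- A's first-match loop over enumerate is arr.index shifted by the start offset
theorem findLoopA_eq_index? (arr : List Int) (v : Int) (s : Int) :
    findLoopA (PySem.List.enumerate arr s) v = (PySem.List.index? arr v).map (fun n => (s + (n : Int), v)) := by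
  induction arr generalizing s with
  | nil => simp [PySem.List.enumerate_nil, findLoopA, PySem.List.index?_eq_idxOf?]
  | cons x xs ih =>
    rw [PySem.List.enumerate_cons, findLoopA]
    by_cases h : x = v
    · subst h
      rw [if_pos rfl, PySem.List.index?_cons_self]
      simp
    · rw [if_neg h, ih, PySem.List.index?_cons_of_ne (v := v) (xs := xs) h]
      cases PySem.List.index? xs v with
      | none => simp
      | some n => simp; ring

theorem main_eq (arr : List Int) (h : arr ≠ []) : find_median_index arr = find_median_index_alt arr := by
  have hn : 0 < arr.length := List.length_pos_iff.mpr h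
  unfold find_median_index find_median_index_alt
  have hSlen : (PySem.List.sorted arr (fun x => x) false).length = arr.length :=
    PySem.List.length_sorted _ _ _
  simp only [hSlen]
  set mi := PySem.Int.floordiv ((arr.length : Int) - 1) 2 with hmidef
  have hfd : mi = ((arr.length : Int) - 1) / 2 := PySem.Int.floordiv_eq_ediv_of_pos (by norm_num)
  have hmi0 : 0 ≤ mi := by rw [hfd]; omega
  have hmilt : mi < (arr.length : Int) := by rw [hfd]; omega
  have hget := PySem.List.pyGet?_eq_some_getElem (xs := PySem.List.sorted arr (fun x => x) false) (i := mi) hmi0 (by rw [hSlen]; exact hmilt)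
  rw [hget]
  set v := (PySem.List.sorted arr (fun x => x) false)[mi.toNat]'(by omega) with hvdef
  have hsel : selectB arr mi = v := by
    rw [selectB_correct arr.length arr le_rfl mi hmi0 hmilt]
    rw [List.getD_eq_getElem _ _ (by omega)]
  have hvmem : v ∈ arr := by
    rw [← PySem.List.mem_sorted (key := fun x => x) (rev := false)]
    exact List.getElem_mem _
  have hne : PySem.List.index? arr v ≠ none := by
    simp [hvmem]
  obtain ⟨i, hi⟩ := Option.ne_none_iff_exists'.mp hne
  change (findLoopA (PySem.List.enumerate arr 0) v).getD (0, 0) = _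
  rw [findLoopA_eq_index? arr v 0, hsel, hi]
  simp

-- ===== VERDICT (by name: the statement is the Claim_ definition above) =====
theorem find_median_index_spec : Claim_equal_find_median_index := by
  intro arr _ hpre
  unfold Spec_find_median_index
  exact main_eq arr hpre
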